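-- pv_equiv track=rewrite | github.com/Longfellow1/Chat_agent | agent_service/domain/trip/clusterer.py | _allocate_to_days
-- ===== SOURCE A (Python) =====
-- from typing import List, Dict
--
-- def _allocate_to_days(
--
--     clusters: Dict[str, List[Dict]],
--     days: int
-- ) -> List[List[Dict]]:
--     """
--     Allocate clustered POIs to days.
--
--     Args:
--         clusters: Dictionary of business_area -> POIs
--         days: Number of days
--
--     Returns:
--         List of POI lists, one per day
--     """
--     # Flatten all POIs
--     all_pois = []
--     for area, pois in clusters.items():
--         all_pois.extend(pois)
--
--     # Allocate ~5 POIs per day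
--     pois_per_day = 5
--     daily_clusters = []
--
--     for i in range(days):
--         start = i * pois_per_day
--         end = start + pois_per_day
--         daily_pois = all_pois[start:end]
--         daily_clusters.append(daily_pois)
--
--     return daily_clusters
-- ===== SOURCE B (Python) =====
-- def _allocate_to_days(clusters, days):
--     # Pre-allocate day buckets and distribute POIs in one pass by global index // 5.
--     daily_clusters = [[] for _ in range(days)]
--     idx = 0
--     for pois in clusters.values():
--         for poi in pois:
--             bucket = idx // 5
--             if bucket < days:
--                 daily_clusters[bucket].append(poi)
--             idx += 1
--     return daily_clusters
-- ===== Notes on version B (the rewrite author's own statement) =====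
-- stated objective: alternative
-- what changed: Replaces flatten-then-slice (build all_pois, then for each day take all_pois[5i:5i+5]) by a single distribution pass over clusters.items() that drops each POI into pre-allocated bucket idx//5, discarding overflow POIs.
import Mathlib
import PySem

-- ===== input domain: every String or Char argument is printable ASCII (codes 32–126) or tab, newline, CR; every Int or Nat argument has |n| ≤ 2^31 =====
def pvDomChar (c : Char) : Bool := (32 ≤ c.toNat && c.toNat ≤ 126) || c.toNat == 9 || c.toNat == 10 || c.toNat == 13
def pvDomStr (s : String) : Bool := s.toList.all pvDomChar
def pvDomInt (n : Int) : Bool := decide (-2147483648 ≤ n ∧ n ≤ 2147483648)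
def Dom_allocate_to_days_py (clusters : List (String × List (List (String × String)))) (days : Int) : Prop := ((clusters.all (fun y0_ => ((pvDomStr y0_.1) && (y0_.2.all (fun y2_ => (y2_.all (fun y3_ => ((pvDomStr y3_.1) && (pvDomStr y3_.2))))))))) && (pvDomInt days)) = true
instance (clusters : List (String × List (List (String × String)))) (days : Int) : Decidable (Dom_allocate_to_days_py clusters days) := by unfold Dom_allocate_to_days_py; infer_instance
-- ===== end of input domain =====

-- B replaces A's flatten-then-slice by a single distribution pass keyed by idx // 5 (alternative decomposition, same cost).

-- ===== PORT A =====
-- literal port of A: flatten all POIs, then for i in range(days) append all_pois[5i:5i+5]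
def allocate_to_days_py (clusters : List (String × List (List (String × String)))) (days : Int) : List (List (List (String × String))) :=
  let all_pois := clusters.foldl (fun acc ap => acc ++ ap.2) []
  (PySem.List.pyRange 0 days 1).foldl
    (fun dc i => dc ++ [PySem.List.slice all_pois (some (i * 5)) (some (i * 5 + 5))]) []

-- ===== PORT B =====
-- one distribution step of Source B's inner loop: state = (global idx, daily buckets)
def altStep {α : Type} (days : Int) (st : Nat × List (List α)) (x : α) : Nat × List (List α) :=
  let b := st.1 / 5
  (st.1 + 1, if (b : Int) < days then st.2.set b (st.2.getD b [] ++ [x]) else st.2)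

def allocate_to_days_py_alt (clusters : List (String × List (List (String × String)))) (days : Int) : List (List (List (String × String))) :=
  let daily := (PySem.List.pyRange 0 days 1).map (fun _ => ([] : List (List (String × String))))
  (clusters.foldl (fun st ap => ap.2.foldl (altStep days) st) (0, daily)).2

-- ===== PRECONDITION & SPEC =====
def Spec_allocate_to_days_py (clusters : List (String × List (List (String × String)))) (days : Int) (out : List (List (List (String × String)))) : Prop := out = allocate_to_days_py_alt clusters days
instance (clusters : List (String × List (List (String × String)))) (days : Int) (out : List (List (List (String × String)))) : Decidable (Spec_allocate_to_days_py clusters days out) := by unfold Spec_allocate_to_days_py; infer_instance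

-- ===== CLAIM (what is proved, stated in full; the proofs are below) =====
def Claim_equal_allocate_to_days_py : Prop := ∀ (clusters : List (String × List (List (String × String)))) (days : Int), Dom_allocate_to_days_py clusters days → Spec_allocate_to_days_py clusters days (allocate_to_days_py clusters days)

-- ===== LEMMAS AND PROOFS =====

-- foldl appending singletons = map (A's day loop builds its list this way)
theorem foldl_push_eq_map {α β : Type} (f : α → β) (l : List α) :
    ∀ (init : List β), l.foldl (fun acc x => acc ++ [f x]) init = init ++ l.map f := by
  induction l with
  | nil => intro init; simp
  | cons x xs ih => intro init; simp [ih]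

-- nested fold over clusters = fold over the flattened POI list
theorem foldl_nested_eq_flatMap {α β σ : Type} (g : σ → α → σ) (l : List (β × List α)) :
    ∀ (st : σ), l.foldl (fun st ap => ap.2.foldl g st) st = (l.flatMap (·.2)).foldl g st := by
  induction l with
  | nil => intro st; rfl
  | cons hd tl ih =>
      intro st
      simp [List.flatMap_cons, List.foldl_append, ih]

-- distribution with an empty bucket list stays empty
theorem altStep_foldl_nil {α : Type} (days : Int) (xs : List α) :
    ∀ (st : Nat × List (List α)), st.2 = [] → (xs.foldl (altStep days) st).2 = [] := by
  induction xs with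
  | nil => intro st h; exact h
  | cons x xs ih =>
      intro st h
      apply ih
      simp [altStep, h]

-- closed form of Source B's distribution loop: bucket j ends up with the slice of xs
-- whose global indices idx+k satisfy 5j ≤ idx+k < 5(j+1)
theorem altStep_foldl_eq {α : Type} (days : Int) (xs : List α) :
    ∀ (idx : Nat) (acc : List (List α)), (acc.length : Int) = days →
      (xs.foldl (altStep days) (idx, acc)).2
        = (List.range acc.length).map
            (fun j => acc.getD j [] ++ (xs.take (5 * (j + 1) - idx)).drop (5 * j - idx)) := by
  induction xs with
  | nil =>
      intro idx acc h
      apply List.ext_getElem (by simp)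
      intro j hj hj'
      simp [List.getD, List.getElem?_eq_getElem (by simpa using hj)]
      rfl
  | cons x xs ih =>
      intro idx acc h
      have hd5 : 5 * (idx / 5) + idx % 5 = idx := Nat.div_add_mod idx 5
      have hm5 : idx % 5 < 5 := Nat.mod_lt idx (by norm_num)
      show (xs.foldl (altStep days) (altStep days (idx, acc) x)).2 = _
      by_cases hc : ((idx / 5 : Nat) : Int) < days
      · have hlt : idx / 5 < acc.length := by
          have : ((idx / 5 : Nat) : Int) < (acc.length : Int) := by rw [h]; exact hc
          exact_mod_cast this
        have hstep : altStep days (idx, acc) x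
            = (idx + 1, acc.set (idx / 5) (acc.getD (idx / 5) [] ++ [x])) := by
          simp only [altStep]
          rw [if_pos hc]
        rw [hstep, ih (idx + 1) _ (by simpa using h)]
        rw [List.length_set]
        apply List.map_congr_left
        intro j hj
        have hj' : j < acc.length := List.mem_range.mp hj
        by_cases hje : j = idx / 5
        · have hget : (acc.set (idx / 5) (acc.getD (idx / 5) [] ++ [x])).getD j [] = acc.getD j [] ++ [x] := by
            simp [List.getD, hje, List.getElem?_set_self hlt]
          rw [hget]
          have e1 : 5 * j - idx = 0 := by omega
          have e2 : 5 * j - (idx + 1) = 0 := by omega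
          have e3 : 5 * (j + 1) - idx = (5 * (j + 1) - (idx + 1)) + 1 := by omega
          rw [e1, e2, e3, List.take_succ_cons, List.drop_zero, List.drop_zero, List.append_assoc]
          rfl
        · have hne : idx / 5 ≠ j := by omega
          have hget : (acc.set (idx / 5) (acc.getD (idx / 5) [] ++ [x])).getD j [] = acc.getD j [] := by
            simp [List.getD, List.getElem?_set_ne hne]
          rw [hget]
          congr 1
          by_cases hlo : idx < 5 * j
          · have e1 : 5 * j - idx = (5 * j - (idx + 1)) + 1 := by omega
            have e3 : 5 * (j + 1) - idx = (5 * (j + 1) - (idx + 1)) + 1 := by omega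
            rw [e1, e3, List.take_succ_cons, List.drop_succ_cons]
          · have hhi : 5 * (j + 1) ≤ idx := by omega
            have e1 : 5 * (j + 1) - idx = 0 := by omega
            have e2 : 5 * (j + 1) - (idx + 1) = 0 := by omega
            rw [e1, e2]
            simp
      · have hge : acc.length ≤ idx / 5 := by
          have : (acc.length : Int) ≤ ((idx / 5 : Nat) : Int) := by rw [h]; omega
          exact_mod_cast this
        have hstep : altStep days (idx, acc) x = (idx + 1, acc) := by
          simp only [altStep]
          rw [if_neg hc]
        rw [hstep, ih (idx + 1) _ h]
        apply List.map_congr_left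
        intro j hj
        have hj' : j < acc.length := List.mem_range.mp hj
        congr 1
        have hhi : 5 * (j + 1) ≤ idx := by omega
        have e1 : 5 * (j + 1) - idx = 0 := by omega
        have e2 : 5 * (j + 1) - (idx + 1) = 0 := by omega
        rw [e1, e2]
        simp

-- ===== VERDICT (by name: the statement is the Claim_ definition above) =====
theorem allocate_to_days_py_spec : Claim_equal_allocate_to_days_py := by
  intro clusters days _
  simp only [Spec_allocate_to_days_py, allocate_to_days_py, allocate_to_days_py_alt]
  rw [foldl_nested_eq_flatMap]
  set all := clusters.foldl (fun acc ap => acc ++ ap.2) [] with hall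
  have hflat : all = clusters.flatMap (·.2) := by
    rw [hall]; simpa using PySem.List.foldl_append_eq_flatMap (g := (·.2)) (acc := ([] : List (List (String × String)))) (l := clusters)
  rcases Int.le_total 0 days with hpos | hneg
  · -- days ≥ 0
    obtain ⟨d, rfl⟩ : ∃ d : Nat, days = (d : Int) := ⟨days.toNat, (Int.toNat_of_nonneg hpos).symm⟩
    have hrange : PySem.List.pyRange 0 (d : Int) 1 = (List.range d).map (fun k => ((k : Nat) : Int)) := by
      rw [PySem.List.pyRange_one]
      simp
    rw [hrange]
    have hlen : (((List.range d).map (fun k => ((k : Nat) : Int))).map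
        (fun _ => ([] : List (List (String × String))))).length = d := by simp
    rw [← hflat] at *
    rw [altStep_foldl_eq (d : Int) all 0 _ (by simp)]
    rw [hlen]
    -- A side: foldl append of singletons = map
    rw [foldl_push_eq_map (fun i => PySem.List.slice all (some (i * 5)) (some (i * 5 + 5))) _ [],
      List.nil_append, List.map_map]
    apply List.map_congr_left
    intro j hj
    have hj' : j < d := List.mem_range.mp hj
    have hc1 : ((j : Int) * 5) = ((5 * j : Nat) : Int) := by push_cast; ring
    have hc2 : (((5 * j : Nat) : Int) + 5) = ((5 * j + 5 : Nat) : Int) := by push_cast; ring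
    simp only [Function.comp]
    rw [hc1, hc2, PySem.List.slice_natCast]
    have hgd : (((List.range d).map (fun k => ((k : Nat) : Int))).map
        (fun _ => ([] : List (List (String × String))))).getD j [] = [] := by
      simp [List.getD]
      cases (List.range d)[j]? <;> simp
    rw [hgd, List.nil_append]
    simp only [Nat.sub_zero]
    rw [List.drop_take]
    congr 1
  · -- days < 0: range empty on A's side, empty bucket list stays empty on B's side
    have hr : PySem.List.pyRange 0 days 1 = [] := by
      have h0 : (days - 0).toNat = 0 := by omega
      rw [PySem.List.pyRange_one, h0]
      simp
    rw [hr]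
    simp only [List.map_nil, List.foldl_nil]
    exact (altStep_foldl_nil days _ (0, []) rfl).symm
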